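-- pv_equiv track=rewrite | github.com/Akrielz/diffusion_structure_inpaint | bin/structure_utils.py | _check_working_alignment
-- ===== SOURCE A (Python) =====
-- from typing import Optional, List, Dict, Any
--
-- def _check_working_alignment(arr: List[int]) -> bool:
--     """
--     Check if the alignment is working. The alignment is working if the missing residues
--     can be replaced with consecutive numbers.
--
--     Parameters
--     ----------
--     arr : list[int]
--         The array of residues id.
--
--     Returns
--     -------
--     is_working : bool
--         True if the alignment is working, False otherwise.
--     """
--
--     # find the first and last non-missing value in the array
--     start, end = None, None
--     for i in range(len(arr)):
--         if arr[i] != -1: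
--             start = i
--             break
--     for i in range(len(arr)-1, -1, -1):
--         if arr[i] != -1:
--             end = i
--             break
--
--     # if there are no non-missing values, the array is monotonic by default
--     if start is None or end is None:
--         return True
--
--     # check that the missing values can be replaced with consecutive numbers
--     prev_val = arr[start]
--     num_consecutive_missing = 0
--     for i in range(start+1, end+1):
--         if arr[i] == -1:
--             num_consecutive_missing += 1
--         else:
--             # fill in the missing values with consecutive numbers
--             if num_consecutive_missing > 0:
--                 if num_consecutive_missing > arr[i] - prev_val - 1:
--                     return False
--                 for j in range(num_consecutive_missing):
--                     arr[i-j-1] = arr[i] - j - 1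
--                 num_consecutive_missing = 0
--             # check that the array is still monotonic
--             if arr[i] < prev_val:
--                 return False
--             prev_val = arr[i]
--
--     # fill in any missing values at the end of the array
--     if num_consecutive_missing > 0:
--         if num_consecutive_missing > arr[end] - prev_val:
--             return False
--         for j in range(num_consecutive_missing):
--             arr[end-j] = prev_val + j + 1
--
--     return True
-- ===== SOURCE B (Python) =====
-- from typing import List
--
--
-- def _check_working_alignment(arr: List[int]) -> bool:
--     # Fill-then-check: build the candidate completed span by one right-to-left
--     # pass (each missing slot takes its right neighbour's value minus one), then
--     # accept iff that completed span is monotone (strictly rising into every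
--     # originally-missing slot).  arr is updated in place on acceptance; on
--     # rejection arr is left untouched (A may have partially filled it -- the
--     # equivalence claimed is about the return value only).
--     n = len(arr)
--     start = next((j for j in range(n) if arr[j] != -1), None)
--     if start is None:
--         return True
--     end = next(j for j in range(n - 1, -1, -1) if arr[j] != -1)
--     seg = arr[start:end + 1]
--     filled = []
--     cur = 0
--     for v in reversed(seg):
--         cur = v if v != -1 else cur - 1
--         filled.append(cur)
--     filled.reverse()
--     ok = all(x < y if v == -1 else x <= y
--              for x, y, v in zip(filled, filled[1:], seg[1:]))
--     if ok:
--         arr[start:end + 1] = filled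
--     return ok
-- ===== Notes on version B (the rewrite author's own statement) =====
-- stated objective: alternative
-- what changed: B is fill-then-check instead of A's streaming validate-and-fill: it first completes the known span in one RIGHT-to-left pass (each missing slot gets its right neighbour's value minus one) and then accepts iff the completed span is monotone, strictly rising into every originally-missing slot, writing the span back only on acceptance; A scans left-to-right with a consecutive-missing counter, checking each gap against the enclosing values and mutating as it goes with early returns.
import Mathlib
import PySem

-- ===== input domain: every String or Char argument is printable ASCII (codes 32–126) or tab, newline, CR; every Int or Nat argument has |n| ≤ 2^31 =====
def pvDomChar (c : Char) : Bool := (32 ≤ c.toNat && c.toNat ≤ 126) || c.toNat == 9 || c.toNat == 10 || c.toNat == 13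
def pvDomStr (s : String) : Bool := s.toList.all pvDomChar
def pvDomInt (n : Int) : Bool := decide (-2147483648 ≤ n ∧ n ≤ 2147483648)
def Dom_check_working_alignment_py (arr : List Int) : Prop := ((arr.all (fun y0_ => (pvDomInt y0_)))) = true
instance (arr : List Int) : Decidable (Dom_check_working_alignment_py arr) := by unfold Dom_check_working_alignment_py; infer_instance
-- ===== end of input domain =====

-- B is fill-then-check: one right-to-left pass completes the known span (a missing slot
-- gets its right neighbour's value minus one), then one scan accepts iff the completed
-- span is monotone, strictly rising into every originally-missing slot; A streams
-- left-to-right with a consecutive-missing counter, checking and filling gap by gap.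
-- Both Pythons also mutate `arr` in place; only the returned Bool is modelled and proved
-- here (B writes the span back only on acceptance, A may fill partially before an early
-- False return).

-- ===== PORT A =====
-- `for j in range(num_consecutive_missing): arr[i-j-1] = arr[i] - j - 1`
def pvFillGapA (a0 : List Int) (i : Int) (cnt : Int) : List Int :=
  (PySem.List.pyRange 0 cnt 1).foldl
    (fun a j => PySem.List.pySetD a (i - j - 1) (PySem.List.pyGetD a i 0 - j - 1)) a0

-- the `for i in range(start+1, end+1)` loop; `none` = the Python returned False inside it,
-- `some (a, prev, cnt)` = the loop finished with these values of arr, prev_val, num_consecutive_missing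
def pvLoopA : List Int → List Int → Int → Int → Option (List Int × Int × Int)
  | [], a, prev, cnt => some (a, prev, cnt)
  | i :: rest, a, prev, cnt =>
    if PySem.List.pyGetD a i 0 == -1 then
      pvLoopA rest a prev (cnt + 1)
    else
      if cnt > 0 then
        if cnt > PySem.List.pyGetD a i 0 - prev - 1 then none
        else
          let a' := pvFillGapA a i cnt
          if PySem.List.pyGetD a' i 0 < prev then none
          else pvLoopA rest a' (PySem.List.pyGetD a' i 0) 0
      else
        if PySem.List.pyGetD a i 0 < prev then none
        else pvLoopA rest a (PySem.List.pyGetD a i 0) 0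

-- `for j in range(num_consecutive_missing): arr[end-j] = prev_val + j + 1`
def pvFillEndA (a0 : List Int) (e prev cnt : Int) : List Int :=
  (PySem.List.pyRange 0 cnt 1).foldl
    (fun a j => PySem.List.pySetD a (e - j) (prev + j + 1)) a0

def check_working_alignment_py (arr : List Int) : Bool :=
  let n : Int := PySem.List.len arr
  -- `for i in range(len(arr)): if arr[i] != -1: start = i; break` (and the backward twin)
  let start? := (PySem.List.pyRange 0 n 1).find? (fun i => PySem.List.pyGetD arr i 0 != -1)
  let end? := (PySem.List.pyRange (n - 1) (-1) (-1)).find? (fun i => PySem.List.pyGetD arr i 0 != -1)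
  match start?, end? with
  | some s, some e =>
    match pvLoopA (PySem.List.pyRange (s + 1) (e + 1) 1) arr (PySem.List.pyGetD arr s 0) 0 with
    | none => false
    | some (a, prev, cnt) =>
      if cnt > 0 then
        if cnt > PySem.List.pyGetD a e 0 - prev then false
        else
          -- Python fills arr[end-j] here; a write-only step, the function then returns True
          let _ := pvFillEndA a e prev cnt
          true
      else true
  | _, _ => true

-- ===== PORT B =====
def check_working_alignment_py_alt (arr : List Int) : Bool :=
  let n : Int := PySem.List.len arr
  -- `start = next((j for j in range(n) if arr[j] != -1), None)`
  match (PySem.List.pyRange 0 n 1).find? (fun j => PySem.List.pyGetD arr j 0 != -1) with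
  | none => true
  | some s =>
    -- `end = next(j for j in range(n-1, -1, -1) if arr[j] != -1)`
    match (PySem.List.pyRange (n - 1) (-1) (-1)).find? (fun j => PySem.List.pyGetD arr j 0 != -1) with
    | none => true  -- unreachable: a known index exists, so the backward scan finds one
    | some e =>
      let seg := PySem.List.slice arr (some s) (some (e + 1))
      -- `for v in reversed(seg): cur = v if v != -1 else cur - 1; filled.append(cur)` then `filled.reverse()`
      let p := seg.reverse.foldl
        (fun (st : Int × List Int) v =>
          let cur := if v != -1 then v else st.1 - 1
          (cur, st.2 ++ [cur])) ((0 : Int), ([] : List Int))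
      let filled := p.2.reverse
      -- `ok = all(x < y if v == -1 else x <= y for x, y, v in zip(filled, filled[1:], seg[1:]))`;
      -- the conditional `arr[start:end+1] = filled` only mutates the argument, then `return ok`
      (filled.zip ((filled.drop 1).zip (seg.drop 1))).all
        (fun t => if t.2.2 == -1 then decide (t.1 < t.2.1) else decide (t.1 ≤ t.2.1))

-- ===== PRECONDITION & SPEC =====
def Spec_check_working_alignment_py (arr : List Int) (out : Bool) : Prop := out = check_working_alignment_py_alt arr
instance (arr : List Int) (out : Bool) : Decidable (Spec_check_working_alignment_py arr out) := by unfold Spec_check_working_alignment_py; infer_instance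

-- ===== CLAIM (what is proved, stated in full; the proofs are below) =====
def Claim_equal_check_working_alignment_py : Prop := ∀ (arr : List Int), Dom_check_working_alignment_py arr → Spec_check_working_alignment_py arr (check_working_alignment_py arr)

-- ===== LEMMAS AND PROOFS =====

-- pair condition on consecutive known entries (index, value): the gap between them
-- must fit strictly increasing values (equality allowed only when adjacent)
def pvPairOk (p q : Int × Int) : Bool :=
  let g := q.1 - p.1 - 1
  if g == 0 then !(q.2 < p.2) else !(g > q.2 - p.2 - 1)

-- common reference machine: absolute position, last known (index, value) seen
def pvBrun : Int → Option (Int × Int) → List Int → Bool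
  | _, _, [] => true
  | pos, last, v :: vs =>
    if v == -1 then pvBrun (pos + 1) last vs
    else
      (match last with | none => true | some pr => pvPairOk pr (pos, v)) &&
        pvBrun (pos + 1) (some (pos, v)) vs

-- A's loop on the value sequence alone (mutation and indices erased)
def pvSpecLoop : List Int → Int → Int → Option (Int × Int)
  | [], p, c => some (p, c)
  | v :: vs, p, c =>
    if v == -1 then pvSpecLoop vs p (c + 1)
    else
      if c > 0 then
        if c > v - p - 1 then none
        else if v < p then none else pvSpecLoop vs v 0
      else if v < p then none else pvSpecLoop vs v 0

-- B's right-to-left fill, as a structural recursion (head of the recursive fill = `cur`)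
def pvGFill : List Int → List Int
  | [] => []
  | v :: vs => (if v == -1 then (pvGFill vs).headD 0 - 1 else v) :: pvGFill vs

-- B's monotonicity scan with explicit previous filled value
def pvChk : Int → List Int → List Int → Bool
  | _, [], _ => true
  | _, _ :: _, [] => true
  | p, f :: fs, v :: vs => (if v == -1 then decide (p < f) else decide (p ≤ f)) && pvChk f fs vs

-- the fill of a block of k missing slots closed on the right by value w: [w-k, …, w-1]
def pvBlk : Nat → Int → List Int
  | 0, _ => []
  | k + 1, w => (w - (k + 1)) :: pvBlk k w

-- -------- B-side bridges --------

theorem pv_fill_foldl (seg : List Int) : ∀ (acc : List Int),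
    seg.reverse.foldl
        (fun (st : Int × List Int) v =>
          let cur := if v != -1 then v else st.1 - 1
          (cur, st.2 ++ [cur])) ((0 : Int), acc)
      = ((pvGFill seg).headD 0, acc ++ (pvGFill seg).reverse) := by
  induction seg with
  | nil => intro acc; simp [pvGFill]
  | cons v vs ih =>
    intro acc
    simp only [List.reverse_cons, List.foldl_append, ih acc, List.foldl_cons, List.foldl_nil]
    by_cases hv : v = -1 <;> simp [pvGFill, hv, bne]

theorem pv_zip_chk (C : Int × Int × Int → Bool) (hC : ∀ x y v, C (x, y, v)
      = (if v == -1 then decide (x < y) else decide (x ≤ y))) :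
    ∀ (fs : List Int) (p : Int) (vs : List Int),
    (((p :: fs).zip (fs.zip vs)).all C) = pvChk p fs vs := by
  intro fs
  induction fs with
  | nil => intro p vs; simp [pvChk]
  | cons f fs ih =>
    intro p vs
    cases vs with
    | nil => simp [pvChk]
    | cons v vs => simp [pvChk, hC, ih f vs]

theorem pv_gfill_blk (w : Int) (hw : w ≠ -1) (rest : List Int) : ∀ (k : Nat),
    pvGFill (List.replicate k (-1) ++ w :: rest) = pvBlk k w ++ w :: pvGFill rest := by
  have hhead : ∀ k : Nat, (pvBlk k w ++ w :: pvGFill rest).headD 0 = w - k := by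
    intro k; cases k with
    | zero => simp [pvBlk]
    | succ k => simp [pvBlk]
  intro k
  induction k with
  | zero => simp [pvGFill, hw, pvBlk]
  | succ k ih =>
    have h2 : List.replicate (k + 1) (-1 : Int) ++ w :: rest
        = -1 :: (List.replicate k (-1) ++ w :: rest) := by simp [List.replicate_succ]
    rw [h2]
    show (if ((-1 : Int) == -1) = true
        then (pvGFill (List.replicate k (-1) ++ w :: rest)).headD 0 - 1 else -1)
          :: pvGFill (List.replicate k (-1) ++ w :: rest)
        = pvBlk (k + 1) w ++ w :: pvGFill rest
    rw [ih, hhead k]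
    show _ = (w - ((k : Nat) + 1 : Nat)) :: pvBlk k w ++ w :: pvGFill rest
    simp only [beq_self_eq_true, if_true, List.cons_append, List.cons.injEq]
    exact ⟨by push_cast; ring, by constructor⟩

theorem pv_chk_blk (w : Int) (hw : w ≠ -1) (rest : List Int) : ∀ (k : Nat) (p : Int),
    pvChk p (pvBlk k w ++ w :: pvGFill rest) (List.replicate k (-1) ++ w :: rest)
      = ((if k = 0 then decide (p ≤ w) else decide (p < w - k)) && pvChk w (pvGFill rest) rest) := by
  have hwb : (w == -1) = false := by simp [hw]
  intro k
  induction k with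
  | zero =>
    intro p
    show pvChk p ([] ++ w :: pvGFill rest) ([] ++ w :: rest) = _
    simp [pvChk, hwb]
  | succ k ih =>
    intro p
    have h2 : List.replicate (k + 1) (-1 : Int) ++ w :: rest
        = -1 :: (List.replicate k (-1) ++ w :: rest) := by simp [List.replicate_succ]
    have h3 : pvBlk (k + 1) w ++ w :: pvGFill rest
        = (w - ((k : Int) + 1)) :: (pvBlk k w ++ w :: pvGFill rest) := by
      show (w - ((k : Nat) + 1 : Nat)) :: pvBlk k w ++ w :: pvGFill rest = _
      simp only [List.cons_append, List.cons.injEq]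
      exact ⟨by push_cast; ring, by constructor⟩
    rw [h2, h3]
    show ((if ((-1 : Int) == -1) = true then decide (p < w - ((k : Int) + 1))
          else decide (p ≤ w - ((k : Int) + 1))) &&
        pvChk (w - ((k : Int) + 1)) (pvBlk k w ++ w :: pvGFill rest)
          (List.replicate k (-1) ++ w :: rest)) = _
    rw [ih (w - ((k : Int) + 1))]
    have h1 : (if k = 0 then decide (w - ((k : Int) + 1) ≤ w)
        else decide (w - ((k : Int) + 1) < w - (k : Int))) = true := by
      split_ifs <;> simp
      omega
    rw [h1]
    have h4 : (if k + 1 = 0 then decide (p ≤ w) else decide (p < w - ((k + 1 : Nat) : Int)))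
        = decide (p < w - ((k : Int) + 1)) := by
      simp only [Nat.succ_ne_zero, if_false, decide_eq_decide]
      push_cast
      omega
    rw [h4]
    simp

-- a nonempty list whose last element is not -1 splits as replicate k (-1) ++ w :: rest
theorem pv_decomp : ∀ (vs : List Int), vs ≠ [] → vs.getLast? ≠ some (-1) →
    ∃ (k : Nat) (w : Int) (rest : List Int), w ≠ -1 ∧
      vs = List.replicate k (-1) ++ w :: rest ∧ (rest = [] ∨ rest.getLast? ≠ some (-1)) := by
  intro vs
  induction vs with
  | nil => intro h; exact absurd rfl h
  | cons v vs ih =>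
    intro _ hlast
    by_cases hv : v = -1
    · subst hv
      cases vs with
      | nil => simp at hlast
      | cons a t =>
        have hl : (a :: t).getLast? ≠ some (-1) := by
          simpa [List.getLast?_cons_cons] using hlast
        obtain ⟨k, w, rest, hw, heq, hrest⟩ := ih (by simp) hl
        refine ⟨k + 1, w, rest, hw, ?_, hrest⟩
        rw [List.replicate_succ, List.cons_append, heq]
    · refine ⟨0, v, vs, hv, by simp, ?_⟩
      cases vs with
      | nil => exact Or.inl rfl
      | cons a t =>
        exact Or.inr (by simpa [List.getLast?_cons_cons] using hlast)

-- pvBrun over a block of missing values just advances the position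
theorem pv_brun_skip (vs : List Int) : ∀ (ws : List Int) (pos : Int) (last : Option (Int × Int)),
    (∀ v ∈ vs, v = -1) →
    pvBrun pos last (vs ++ ws) = pvBrun (pos + vs.length) last ws := by
  induction vs with
  | nil => intro ws pos last _; simp
  | cons v vs ih =>
    intro ws pos last h
    have hv : v = -1 := h v (by simp)
    have := ih ws (pos + 1) last (fun x hx => h x (by simp [hx]))
    simp [pvBrun, hv, this]; ring_nf

theorem pv_brun_all_missing (vs : List Int) : ∀ (pos : Int) (last : Option (Int × Int)),
    (∀ v ∈ vs, v = -1) → pvBrun pos last vs = true := by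
  intro pos last h
  have := pv_brun_skip vs [] pos last h
  simpa using this

theorem pv_brun_tail (vs : List Int) (tr : List Int) (htr : ∀ v ∈ tr, v = -1) :
    ∀ (pos : Int) (last : Option (Int × Int)),
    pvBrun pos last (vs ++ tr) = pvBrun pos last vs := by
  induction vs with
  | nil => intro pos last; simp [pvBrun, pv_brun_all_missing tr pos last htr]
  | cons v vs ih =>
    intro pos last
    by_cases hv : v = -1 <;> simp [pvBrun, hv, ih]

-- CORE: B's fill+scan on a value list ending in a known value equals the pair machine
theorem pv_chk_brun : ∀ (n : Nat) (vs : List Int), vs.length ≤ n →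
    (vs = [] ∨ vs.getLast? ≠ some (-1)) → ∀ (p i1 : Int),
    pvChk p (pvGFill vs) vs = pvBrun (i1 + 1) (some (i1, p)) vs := by
  intro n
  induction n with
  | zero =>
    intro vs h _ p i1
    have : vs = [] := List.length_eq_zero_iff.mp (Nat.le_zero.mp h)
    subst this; rfl
  | succ n ih =>
    intro vs hlen hlast p i1
    rcases hlast with h | hlast
    · subst h; rfl
    by_cases hnil : vs = []
    · subst hnil; rfl
    obtain ⟨k, w, rest, hw, heq, hrest⟩ := pv_decomp vs hnil hlast
    subst heq
    rw [pv_gfill_blk w hw rest k, pv_chk_blk w hw rest k p]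
    rw [pv_brun_skip (List.replicate k (-1)) (w :: rest) (i1 + 1) (some (i1, p))
      (by intro v hv; exact List.eq_of_mem_replicate hv)]
    have hwb : (w == -1) = false := by simp [hw]
    simp only [List.length_replicate, pvBrun, hwb, Bool.false_eq_true, if_false]
    have hpair : pvPairOk (i1, p) (i1 + 1 + (k : Int), w)
        = (if k = 0 then decide (p ≤ w) else decide (p < w - (k : Int))) := by
      simp only [pvPairOk]
      have hg : i1 + 1 + (k : Int) - i1 - 1 = (k : Int) := by ring
      rw [hg]
      cases k with
      | zero =>
        simp only [Nat.cast_zero, beq_self_eq_true, if_true]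
        by_cases h : w < p
        · simp [h, show ¬ p ≤ w from by omega]
        · simp [h, show p ≤ w from by omega]
      | succ k =>
        have hnz : (((k + 1 : Nat)) : Int) ≠ 0 := by push_cast; omega
        rw [if_neg (by simpa using hnz), if_neg (by omega)]
        by_cases h : ((k + 1 : Nat) : Int) > w - p - 1
        · rw [decide_eq_true h,
            decide_eq_false (show ¬ p < w - ((k + 1 : Nat) : Int) from by push_cast at h ⊢; omega)]
          rfl
        · rw [decide_eq_false h,
            decide_eq_true (show p < w - ((k + 1 : Nat) : Int) from by push_cast at h ⊢; omega)]
          rfl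
    rw [hpair]
    congr 1
    have hlen' : rest.length ≤ n := by
      simp [List.length_append] at hlen; omega
    have := ih rest hlen' hrest w (i1 + 1 + (k : Int))
    rw [this]

-- -------- A-side bridges --------

-- writing at a nonnegative index strictly below k does not change the value read at k
theorem pv_set_get_lt (a : List Int) (m k : Int) (v : Int) (hm : 0 ≤ m) (hmk : m < k) :
    PySem.List.pyGetD (PySem.List.pySetD a m v) k 0 = PySem.List.pyGetD a k 0 := by
  have hk : 0 ≤ k := le_trans hm (le_of_lt hmk)
  rw [PySem.List.pySetD_of_nonneg a v hm, PySem.List.pyGetD_of_nonneg _ _ hk,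
    PySem.List.pyGetD_of_nonneg _ _ hk]
  have hne : m.toNat ≠ k.toNat := by omega
  simp [List.getD, List.getElem?_set_ne hne]

-- the gap fill writes only at indices < i, so reads at k ≥ i are unchanged
theorem pv_fill_get_ge (a : List Int) (i cnt : Int) (hc : cnt ≤ i) (k : Int) (hk : i ≤ k) :
    PySem.List.pyGetD (pvFillGapA a i cnt) k 0 = PySem.List.pyGetD a k 0 := by
  unfold pvFillGapA
  have H : ∀ (js : List Int) (a : List Int), (∀ j ∈ js, 0 ≤ j ∧ j < cnt) →
      PySem.List.pyGetD
        (js.foldl (fun a j => PySem.List.pySetD a (i - j - 1) (PySem.List.pyGetD a i 0 - j - 1)) a)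
        k 0 = PySem.List.pyGetD a k 0 := by
    intro js
    induction js with
    | nil => intro a _; rfl
    | cons j js ih =>
      intro a h
      obtain ⟨hj0, hjc⟩ := h j (by simp)
      have hij : 0 ≤ i - j - 1 := by omega
      have hlt : i - j - 1 < k := by omega
      simp only [List.foldl_cons]
      rw [ih _ (fun x hx => h x (by simp [hx])), pv_set_get_lt _ _ _ _ hij hlt]
  exact H _ a (fun j hj => by
    have := PySem.List.mem_pyRange_one.mp hj; exact ⟨this.1, this.2⟩)

-- the A loop over a contiguous index range, with the mutation erased, is pvSpecLoop on the values
theorem pv_loopA_spec_aux (hi : Int) (n : Nat) : ∀ (lo : Int), (hi - lo).toNat ≤ n →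
    ∀ (a : List Int) (p c : Int), 0 ≤ c ∧ c ≤ lo →
    Option.map (fun x => (x.2.1, x.2.2)) (pvLoopA (PySem.List.pyRange lo hi 1) a p c)
      = pvSpecLoop ((PySem.List.pyRange lo hi 1).map (fun i => PySem.List.pyGetD a i 0)) p c := by
  induction n with
  | zero =>
    intro lo h a p c _
    rw [PySem.List.pyRange_one_eq_nil (by omega)]
    rfl
  | succ n ih =>
    intro lo h a p c hc
    obtain ⟨hc0, hc⟩ := hc
    by_cases hlt : lo < hi
    · rw [PySem.List.pyRange_one_cons hlt]
      simp only [List.map_cons]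
      by_cases hv : PySem.List.pyGetD a lo 0 = -1
      · simp only [pvLoopA, pvSpecLoop, hv, beq_self_eq_true, if_true]
        exact ih (lo + 1) (by omega) a p (c + 1) ⟨by omega, by omega⟩
      · have hvb : (PySem.List.pyGetD a lo 0 == -1) = false := by simp [hv]
        simp only [pvLoopA, pvSpecLoop, hvb, Bool.false_eq_true, if_false]
        by_cases hcz : c > 0
        · simp only [hcz, if_true]
          by_cases hbig : c > PySem.List.pyGetD a lo 0 - p - 1
          · simp [hbig]
          · have hfix : PySem.List.pyGetD (pvFillGapA a lo c) lo 0 = PySem.List.pyGetD a lo 0 :=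
              pv_fill_get_ge a lo c hc lo le_rfl
            have hmap : (PySem.List.pyRange (lo + 1) hi 1).map
                  (fun i => PySem.List.pyGetD (pvFillGapA a lo c) i 0)
                = (PySem.List.pyRange (lo + 1) hi 1).map (fun i => PySem.List.pyGetD a i 0) := by
              apply List.map_congr_left
              intro i hi'
              have := PySem.List.mem_pyRange_one.mp hi'
              exact pv_fill_get_ge a lo c (by omega) i (by omega)
            by_cases hvp : PySem.List.pyGetD a lo 0 < p
            · simp [hbig, hfix, hvp]
            · simp only [hbig, if_false, hfix, hvp]
              rw [← hmap]
              exact ih (lo + 1) (by omega) (pvFillGapA a lo c) (PySem.List.pyGetD a lo 0) 0 ⟨le_rfl, by omega⟩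
        · simp only [hcz, if_false]
          by_cases hvp : PySem.List.pyGetD a lo 0 < p
          · simp [hvp]
          · simp only [hvp, if_false]
            exact ih (lo + 1) (by omega) a (PySem.List.pyGetD a lo 0) 0 ⟨le_rfl, by omega⟩
    · rw [PySem.List.pyRange_one_eq_nil (by omega)]
      rfl

theorem pv_loopA_spec (lo hi : Int) (a : List Int) (p c : Int) (hc : 0 ≤ c ∧ c ≤ lo) :
    Option.map (fun x => (x.2.1, x.2.2)) (pvLoopA (PySem.List.pyRange lo hi 1) a p c)
      = pvSpecLoop ((PySem.List.pyRange lo hi 1).map (fun i => PySem.List.pyGetD a i 0)) p c :=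
  pv_loopA_spec_aux hi (hi - lo).toNat lo le_rfl a p c hc

-- if the last value of vs is not -1 (or vs is empty with c = 0), a successful pvSpecLoop ends with counter 0
theorem pv_specLoop_last (vs : List Int) : ∀ (p c p' c' : Int),
    vs.getLast? ≠ some (-1) → pvSpecLoop vs p c = some (p', c') → c' = 0 ∨ (vs = [] ∧ c' = c) := by
  induction vs with
  | nil =>
    intro p c p' c' _ h
    simp only [pvSpecLoop, Option.some.injEq, Prod.mk.injEq] at h
    exact Or.inr ⟨rfl, h.2.symm⟩
  | cons v vs ih =>
    intro p c p' c' hlast h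
    have step : ∀ (p0 c0 : Int), pvSpecLoop vs p0 c0 = some (p', c') →
        (vs = [] → (p0 = p' ∧ c0 = c')) ∧ (vs ≠ [] → c' = 0 ∨ (vs = [] ∧ c' = c0)) := by
      intro p0 c0 h0
      constructor
      · intro hnil; subst hnil
        simp only [pvSpecLoop, Option.some.injEq, Prod.mk.injEq] at h0
        exact ⟨h0.1, h0.2⟩
      · intro hne
        have hl : vs.getLast? ≠ some (-1) := by
          cases vs with
          | nil => simp at hne
          | cons w ws => simpa [List.getLast?_cons_cons] using hlast
        exact ih p0 c0 p' c' hl h0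
    by_cases hnil : vs = []
    · subst hnil
      have hv : v ≠ -1 := by simpa using hlast
      simp only [pvSpecLoop, beq_iff_eq, hv, if_false] at h
      split_ifs at h <;>
        simp only [Option.some.injEq, Prod.mk.injEq] at h <;>
        exact Or.inl h.2.symm
    · simp only [pvSpecLoop, beq_iff_eq] at h
      split_ifs at h <;>
        first
        | (cases h)
        | (rcases (step _ _ h).2 hnil with h0 | h0
           · exact Or.inl h0
           · exact absurd h0.1 hnil)

-- pvSpecLoop succeeds exactly when the pair-checking state machine accepts
theorem pv_specLoop_brun (vs : List Int) : ∀ (p c i1 pos : Int), 0 ≤ c → pos = i1 + c + 1 →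
    (pvSpecLoop vs p c).isSome = pvBrun pos (some (i1, p)) vs := by
  induction vs with
  | nil => intro p c i1 pos _ _; rfl
  | cons v vs ih =>
    intro p c i1 pos hc hpos
    by_cases hv : v = -1
    · simp only [pvSpecLoop, pvBrun, hv, beq_self_eq_true, if_true]
      exact ih p (c + 1) i1 (pos + 1) (by omega) (by omega)
    · have hg : pos - i1 - 1 = c := by omega
      simp only [pvSpecLoop, pvBrun, beq_iff_eq, hv, if_false, pvPairOk, hg]
      by_cases hcz : c > 0
      · simp only [hcz, if_true]
        by_cases hbig : c > v - p - 1
        · simp [hbig]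
          intro h _; omega
        · have hvp : ¬ v < p := by omega
          simp only [hbig, if_false, hvp]
          simpa [hbig, hvp] using ih v 0 pos (pos + 1) (by omega) (by omega)
      · have hc0 : c = 0 := by omega
        subst hc0
        simp only [hcz, if_false]
        by_cases hvp : v < p
        · simp [hvp]
        · simpa [hvp] using ih v 0 pos (pos + 1) (by omega) (by omega)

-- forward find? over a range: characterisation of a hit
theorem pv_find_fwd (b : Int) (f : Int → Bool) : ∀ (a x : Int),
    (PySem.List.pyRange a b 1).find? f = some x →
    a ≤ x ∧ x < b ∧ f x = true ∧ ∀ k, a ≤ k → k < x → f k = false := by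
  have aux : ∀ (n : Nat) (a x : Int), (b - a).toNat ≤ n →
      (PySem.List.pyRange a b 1).find? f = some x →
      a ≤ x ∧ x < b ∧ f x = true ∧ ∀ k, a ≤ k → k < x → f k = false := by
    intro n
    induction n with
    | zero =>
      intro a x h hf
      rw [PySem.List.pyRange_one_eq_nil (by omega)] at hf
      cases hf
    | succ n ih =>
      intro a x h hf
      by_cases hab : a < b
      · rw [PySem.List.pyRange_one_cons hab] at hf
        by_cases hfa : f a = true
        · rw [List.find?_cons_of_pos hfa] at hf
          obtain rfl : a = x := by simpa using hf
          exact ⟨le_rfl, hab, hfa, fun k h1 h2 => absurd h1 (by omega)⟩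
        · rw [List.find?_cons_of_neg (by simp [hfa])] at hf
          obtain ⟨h1, h2, h3, h4⟩ := ih (a + 1) x (by omega) hf
          refine ⟨by omega, h2, h3, fun k hk1 hk2 => ?_⟩
          by_cases hka : k = a
          · subst hka; simpa using hfa
          · exact h4 k (by omega) hk2
      · rw [PySem.List.pyRange_one_eq_nil (by omega)] at hf
        cases hf
  exact fun a x hf => aux (b - a).toNat a x le_rfl hf

-- backward find? over range(a, -1(excl), -1): characterisation of a hit
theorem pv_find_bwd (b : Int) (f : Int → Bool) : ∀ (a x : Int),
    (PySem.List.pyRange a b (-1)).find? f = some x →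
    b < x ∧ x ≤ a ∧ f x = true ∧ ∀ k, x < k → k ≤ a → f k = false := by
  have aux : ∀ (n : Nat) (a x : Int), (a - b).toNat ≤ n →
      (PySem.List.pyRange a b (-1)).find? f = some x →
      b < x ∧ x ≤ a ∧ f x = true ∧ ∀ k, x < k → k ≤ a → f k = false := by
    intro n
    induction n with
    | zero =>
      intro a x h hf
      rw [PySem.List.pyRange_neg_one_eq_nil (by omega)] at hf
      cases hf
    | succ n ih =>
      intro a x h hf
      by_cases hab : b < a
      · rw [PySem.List.pyRange_neg_one_cons hab] at hf
        by_cases hfa : f a = true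
        · rw [List.find?_cons_of_pos hfa] at hf
          obtain rfl : a = x := by simpa using hf
          exact ⟨hab, le_rfl, hfa, fun k h1 h2 => absurd h1 (by omega)⟩
        · rw [List.find?_cons_of_neg (by simp [hfa])] at hf
          obtain ⟨h1, h2, h3, h4⟩ := ih (a - 1) x (by omega) hf
          refine ⟨h1, by omega, h3, fun k hk1 hk2 => ?_⟩
          by_cases hka : k = a
          · subst hka; simpa using hfa
          · exact h4 k hk1 (by omega)
      · rw [PySem.List.pyRange_neg_one_eq_nil (by omega)] at hf
        cases hf
  exact fun a x hf => aux (a - b).toNat a x le_rfl hf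

-- reading a list at a valid Nat position
theorem pv_get_nat (arr : List Int) (k : Nat) (hk : k < arr.length) :
    PySem.List.pyGetD arr (k : Int) 0 = arr[k] := by
  rw [PySem.List.pyGetD_eq_getElem arr 0 (by omega) (by exact_mod_cast hk)]
  simp

-- reading a range of a list is the corresponding drop/take slice
theorem pv_map_range_eq (arr : List Int) (a b : Int) (ha : 0 ≤ a) (_hab : a ≤ b)
    (hb : b ≤ arr.length) :
    (PySem.List.pyRange a b 1).map (fun j => PySem.List.pyGetD arr j 0)
      = (arr.drop a.toNat).take (b - a).toNat := by
  apply List.ext_getElem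
  · simp [PySem.List.length_pyRange_one]
    omega
  · intro k h1 h2
    rw [List.getElem_map, PySem.List.getElem_pyRange_one]
    rw [List.getElem_take, List.getElem_drop]
    rw [List.length_map, PySem.List.length_pyRange_one] at h1
    rw [PySem.List.pyGetD_eq_getElem arr 0 (by omega) (by omega)]
    congr 1
    omega

-- stripping the missing prefix/suffix: the machine on arr = the machine on the core
theorem pv_brun_strip (arr : List Int) (s e : Int)
    (hs : (PySem.List.pyRange 0 (PySem.List.len arr) 1).find?
      (fun i => PySem.List.pyGetD arr i 0 != -1) = some s)
    (he : (PySem.List.pyRange (PySem.List.len arr - 1) (-1) (-1)).find?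
      (fun i => PySem.List.pyGetD arr i 0 != -1) = some e) :
    pvBrun 0 none arr
      = pvBrun (s + 1) (some (s, PySem.List.pyGetD arr s 0))
          ((PySem.List.pyRange (s + 1) (e + 1) 1).map (fun i => PySem.List.pyGetD arr i 0)) := by
  obtain ⟨hs0, hsn, hsf, hsmin⟩ := pv_find_fwd _ _ 0 s hs
  obtain ⟨he1, he2, hef, hemax⟩ := pv_find_bwd _ _ (PySem.List.len arr - 1) e he
  have hse : s ≤ e := by
    by_contra hlt
    have := hemax s (by omega) (by omega)
    simp [hsf] at this
  have harr : arr = (PySem.List.pyRange 0 (PySem.List.len arr) 1).map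
      (fun i => PySem.List.pyGetD arr i 0) :=
    (PySem.List.map_pyGetD_pyRange_zero arr 0).symm
  have hsplit : PySem.List.pyRange 0 (PySem.List.len arr) 1
      = (PySem.List.pyRange 0 s 1)
        ++ s :: ((PySem.List.pyRange (s + 1) (e + 1) 1)
          ++ PySem.List.pyRange (e + 1) (PySem.List.len arr) 1) := by
    rw [PySem.List.pyRange_one_append 0 s (PySem.List.len arr) hs0 (by omega),
      PySem.List.pyRange_one_cons (show s < PySem.List.len arr by omega),
      PySem.List.pyRange_one_append (s + 1) (e + 1) (PySem.List.len arr) (by omega) (by omega)]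
  conv_lhs => rw [harr, hsplit]
  simp only [List.map_append, List.map_cons]
  rw [pv_brun_skip _ _ _ _ (by
    intro v hv
    obtain ⟨i, hi, rfl⟩ := List.mem_map.mp hv
    have := PySem.List.mem_pyRange_one.mp hi
    have h0 := hsmin i (by omega) (by omega)
    simpa [bne] using h0)]
  have hlen : (0 : Int) + ((PySem.List.pyRange 0 s 1).map
      (fun i => PySem.List.pyGetD arr i 0)).length = s := by
    simp [PySem.List.length_pyRange_one]
    omega
  rw [hlen]
  have hgs : ¬ (PySem.List.pyGetD arr s 0 == -1) = true := by
    simpa [bne] using hsf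
  simp only [pvBrun, hgs, Bool.false_eq_true, if_false, Bool.true_and]
  exact pv_brun_tail _ _ (by
    intro v hv
    obtain ⟨i, hi, rfl⟩ := List.mem_map.mp hv
    have := PySem.List.mem_pyRange_one.mp hi
    have h0 := hemax i (by omega) (by omega)
    simpa [bne] using h0) _ _

-- B's port equals the pair machine on the whole array
theorem pv_alt_eq_brun (arr : List Int) :
    check_working_alignment_py_alt arr = pvBrun 0 none arr := by
  simp only [check_working_alignment_py_alt]
  cases hs : (PySem.List.pyRange 0 (PySem.List.len arr) 1).find?
      (fun i => PySem.List.pyGetD arr i 0 != -1) with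
  | none =>
    have hall : ∀ v ∈ arr, v = -1 := by
      intro v hv
      obtain ⟨k, hk, rfl⟩ := List.mem_iff_getElem.mp hv
      have := List.find?_eq_none.mp hs (k : Int)
        (PySem.List.mem_pyRange_one.mpr ⟨by omega, by simp [PySem.List.len_eq]; omega⟩)
      rw [pv_get_nat arr k hk] at this
      simpa using this
    rw [pv_brun_all_missing arr 0 none hall]
  | some s =>
    obtain ⟨hs0, hsn, hsf, hsmin⟩ := pv_find_fwd _ _ 0 s hs
    cases he : (PySem.List.pyRange (PySem.List.len arr - 1) (-1) (-1)).find?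
        (fun i => PySem.List.pyGetD arr i 0 != -1) with
    | none =>
      exfalso
      have hmem : s ∈ PySem.List.pyRange (PySem.List.len arr - 1) (-1) (-1) := by
        rw [PySem.List.pyRange_neg_one]
        refine List.mem_map.mpr ⟨(PySem.List.len arr - 1 - s).toNat, ?_, by omega⟩
        simp only [List.mem_range]
        omega
      have := List.find?_eq_none.mp he s hmem
      simp [hsf] at this
    | some e =>
      obtain ⟨he1, he2, hef, hemax⟩ := pv_find_bwd _ _ (PySem.List.len arr - 1) e he
      have hse : s ≤ e := by
        by_contra hlt
        have := hemax s (by omega) (by omega)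
        simp [hsf] at this
      set mid := (PySem.List.pyRange (s + 1) (e + 1) 1).map
        (fun i => PySem.List.pyGetD arr i 0) with hmid
      -- the slice is the head value followed by mid
      have hb' : e + 1 ≤ (arr.length : Int) := by
        simp [PySem.List.len_eq] at he2; omega
      have hseg : PySem.List.slice arr (some s) (some (e + 1))
          = PySem.List.pyGetD arr s 0 :: mid := by
        rw [PySem.List.slice_toNat arr (by omega) (by omega)]
        have h5 : (PySem.List.pyRange s (e + 1) 1).map (fun j => PySem.List.pyGetD arr j 0)
            = (arr.drop s.toNat).take ((e + 1).toNat - s.toNat) := by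
          rw [pv_map_range_eq arr s (e + 1) (by omega) (by omega) hb']
          congr 1
          omega
        rw [← h5, PySem.List.pyRange_one_cons (by omega), List.map_cons, hmid]
      dsimp only
      rw [hseg]
      -- the foldl builds pvGFill of the slice
      rw [pv_fill_foldl (PySem.List.pyGetD arr s 0 :: mid) []]
      simp only [List.nil_append, List.reverse_reverse]
      have hsv : (PySem.List.pyGetD arr s 0 == -1) = false := by simpa [bne] using hsf
      have hgf : pvGFill (PySem.List.pyGetD arr s 0 :: mid)
          = PySem.List.pyGetD arr s 0 :: pvGFill mid := by
        simp [pvGFill, hsv]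
      rw [hgf]
      simp only [List.drop_one, List.tail_cons]
      rw [pv_zip_chk _ (by intro x y v; rfl) (pvGFill mid) (PySem.List.pyGetD arr s 0) mid]
      have hlast : mid = [] ∨ mid.getLast? ≠ some (-1) := by
        by_cases hse' : s = e
        · subst hse'
          left
          rw [hmid, PySem.List.pyRange_one_eq_nil (by omega)]
          rfl
        · right
          rw [hmid, PySem.List.pyRange_one_succ_right (show s + 1 ≤ e by omega),
            List.map_append]
          simp only [List.map_cons, List.map_nil, List.getLast?_concat]
          intro hbad
          apply absurd hef
          simp only [Option.some.injEq] at hbad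
          simp [bne] at hbad ⊢
          exact hbad
      rw [pv_chk_brun mid.length mid le_rfl hlast (PySem.List.pyGetD arr s 0) s]
      exact (pv_brun_strip arr s e hs he).symm

theorem pv_main (arr : List Int) :
    check_working_alignment_py arr = check_working_alignment_py_alt arr := by
  rw [pv_alt_eq_brun]
  simp only [check_working_alignment_py]
  cases hs : (PySem.List.pyRange 0 (PySem.List.len arr) 1).find?
      (fun i => PySem.List.pyGetD arr i 0 != -1) with
  | none =>
    have hall : ∀ v ∈ arr, v = -1 := by
      intro v hv
      obtain ⟨k, hk, rfl⟩ := List.mem_iff_getElem.mp hv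
      have := List.find?_eq_none.mp hs (k : Int)
        (PySem.List.mem_pyRange_one.mpr ⟨by omega, by simp [PySem.List.len_eq]; omega⟩)
      rw [pv_get_nat arr k hk] at this
      simpa using this
    rw [pv_brun_all_missing arr 0 none hall]
  | some s =>
    obtain ⟨hs0, hsn, hsf, hsmin⟩ := pv_find_fwd _ _ 0 s hs
    cases he : (PySem.List.pyRange (PySem.List.len arr - 1) (-1) (-1)).find?
        (fun i => PySem.List.pyGetD arr i 0 != -1) with
    | none =>
      exfalso
      have hmem : s ∈ PySem.List.pyRange (PySem.List.len arr - 1) (-1) (-1) := by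
        rw [PySem.List.pyRange_neg_one]
        refine List.mem_map.mpr ⟨(PySem.List.len arr - 1 - s).toNat, ?_, by omega⟩
        simp only [List.mem_range]
        omega
      have := List.find?_eq_none.mp he s hmem
      simp [hsf] at this
    | some e =>
      obtain ⟨he1, he2, hef, hemax⟩ := pv_find_bwd _ _ (PySem.List.len arr - 1) e he
      have hse : s ≤ e := by
        by_contra hlt
        have := hemax s (by omega) (by omega)
        simp [hsf] at this
      set mid := (PySem.List.pyRange (s + 1) (e + 1) 1).map
        (fun i => PySem.List.pyGetD arr i 0) with hmid
      have hBside : pvBrun 0 none arr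
          = pvBrun (s + 1) (some (s, PySem.List.pyGetD arr s 0)) mid :=
        pv_brun_strip arr s e hs he
      have hC : (pvSpecLoop mid (PySem.List.pyGetD arr s 0) 0).isSome
          = pvBrun (s + 1) (some (s, PySem.List.pyGetD arr s 0)) mid :=
        pv_specLoop_brun mid (PySem.List.pyGetD arr s 0) 0 s (s + 1) le_rfl (by ring)
      rw [← hBside] at hC
      -- A side
      have hL : Option.map (fun x => (x.2.1, x.2.2))
            (pvLoopA (PySem.List.pyRange (s + 1) (e + 1) 1) arr (PySem.List.pyGetD arr s 0) 0)
          = pvSpecLoop mid (PySem.List.pyGetD arr s 0) 0 :=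
        pv_loopA_spec (s + 1) (e + 1) arr (PySem.List.pyGetD arr s 0) 0 ⟨le_rfl, by omega⟩
      change (match pvLoopA (PySem.List.pyRange (s + 1) (e + 1) 1) arr
          (PySem.List.pyGetD arr s 0) 0 with
        | none => false
        | some (a, prev, cnt) =>
          if cnt > 0 then if cnt > PySem.List.pyGetD a e 0 - prev then false else true
          else true) = pvBrun 0 none arr
      cases hspec : pvSpecLoop mid (PySem.List.pyGetD arr s 0) 0 with
      | none =>
        have hnone : pvLoopA (PySem.List.pyRange (s + 1) (e + 1) 1) arr
            (PySem.List.pyGetD arr s 0) 0 = none := by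
          rw [hspec] at hL
          exact Option.map_eq_none_iff.mp hL
        rw [hnone]
        rw [hspec] at hC
        exact hC
      | some pc =>
        obtain ⟨p', c'⟩ := pc
        have hlast : mid.getLast? ≠ some (-1) := by
          by_cases hse' : s = e
          · subst hse'
            rw [hmid, PySem.List.pyRange_one_eq_nil (by omega)]
            simp
          · rw [hmid, PySem.List.pyRange_one_succ_right (show s + 1 ≤ e by omega),
              List.map_append]
            simp only [List.map_cons, List.map_nil, List.getLast?_concat]
            intro hbad
            apply absurd hef
            simp only [Option.some.injEq] at hbad
            simp [bne] at hbad ⊢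
            exact hbad
        have hc' : c' = 0 := by
          rcases pv_specLoop_last mid (PySem.List.pyGetD arr s 0) 0 p' c' hlast hspec with h | h
          · exact h
          · exact h.2
        obtain ⟨st, hst, hproj⟩ : ∃ st, pvLoopA (PySem.List.pyRange (s + 1) (e + 1) 1) arr
            (PySem.List.pyGetD arr s 0) 0 = some st ∧ (st.2.1, st.2.2) = (p', c') := by
          rw [hspec] at hL
          cases hLA : pvLoopA (PySem.List.pyRange (s + 1) (e + 1) 1) arr
              (PySem.List.pyGetD arr s 0) 0 with
          | none => rw [hLA] at hL; cases hL
          | some st => rw [hLA] at hL; exact ⟨st, rfl, by simpa using hL⟩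
        rw [hst]
        obtain ⟨a', p'', c''⟩ := st
        simp only [Prod.mk.injEq] at hproj
        obtain ⟨rfl, rfl⟩ := hproj
        subst hc'
        rw [hspec] at hC
        exact hC

-- ===== VERDICT (by name: the statement is the Claim_ definition above) =====
theorem check_working_alignment_py_spec : Claim_equal_check_working_alignment_py := by
  intro arr _
  unfold Spec_check_working_alignment_py
  exact pv_main arr
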